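-- pv_equiv track=rewrite | github.com/Amit258012/Hashing-- | subset_max_sum.py | fn
-- ===== SOURCE A (Python) =====
-- def fn(arr):
--     n = len(arr)
--     pref = [0] * n
--     hmap = {}
--     res = 0
--
--     for i, num in enumerate(arr):
--         pref[i] = num - i
--
--     for i, val in enumerate(pref):
--         hmap[val] = hmap.get(val, 0) + arr[i]
--         res = max(res, hmap[val])
--     return res
-- ===== SOURCE B (Python) =====
-- def fn(arr):
--     res = 0
--     n = len(arr)
--     for j in range(n):
--         s = 0
--         for i in range(j + 1):
--             if arr[i] - i == arr[j] - j:
--                 s += arr[i]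
--         res = max(res, s)
--     return res
-- ===== Notes on version B (the rewrite author's own statement) =====
-- stated objective: alternative
-- what changed: Drops the auxiliary pref array and the hash map of running per-key sums entirely: for each index j, B recomputes the prefix sum of the group with key arr[i]-i == arr[j]-j by a direct nested index scan and takes the running max of those sums.
import Mathlib
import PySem

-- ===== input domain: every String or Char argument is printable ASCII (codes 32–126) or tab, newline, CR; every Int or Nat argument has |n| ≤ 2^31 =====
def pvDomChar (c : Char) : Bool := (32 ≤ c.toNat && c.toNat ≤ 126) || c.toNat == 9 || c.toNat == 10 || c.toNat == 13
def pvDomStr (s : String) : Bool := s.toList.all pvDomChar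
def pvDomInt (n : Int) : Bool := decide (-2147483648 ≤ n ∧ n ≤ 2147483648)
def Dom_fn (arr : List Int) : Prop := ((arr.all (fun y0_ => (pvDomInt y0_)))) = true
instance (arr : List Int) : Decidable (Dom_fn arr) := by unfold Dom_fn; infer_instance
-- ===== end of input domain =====

-- B replaces A's hash map of running per-key sums by a direct nested index scan per j (alternative, quadratic).

-- ===== PORT A =====
def fn (arr : List Int) : Int :=
  let n := arr.length
  let pref0 : List Int := List.replicate n 0        -- [0] * n (n = len(arr) ≥ 0, exact)
  let pref := (PySem.List.enumerate arr).foldl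
    (fun pr p => PySem.List.pySetD pr p.1 (p.2 - p.1)) pref0
  let st := (PySem.List.enumerate pref).foldl
    (fun (st : PySem.Dict Int Int × Int) p =>
      let s := st.1.getD p.2 0 + PySem.List.pyGetD arr p.1 0
      (st.1.insert p.2 s, max st.2 s))
    (PySem.Dict.empty, 0)
  st.2

-- ===== PORT B =====
def fn_alt (arr : List Int) : Int :=
  (PySem.List.pyRange 0 arr.length 1).foldl
    (fun res j =>
      let s := (PySem.List.pyRange 0 (j + 1) 1).foldl
        (fun s i =>
          if PySem.List.pyGetD arr i 0 - i = PySem.List.pyGetD arr j 0 - j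
          then s + PySem.List.pyGetD arr i 0 else s) 0
      max res s) 0

-- ===== PRECONDITION & SPEC =====
def Spec_fn (arr : List Int) (out : Int) : Prop := out = fn_alt arr
instance (arr : List Int) (out : Int) : Decidable (Spec_fn arr out) := by unfold Spec_fn; infer_instance

-- ===== CLAIM (what is proved, stated in full; the proofs are below) =====
def Claim_equal_fn : Prop := ∀ (arr : List Int), Dom_fn arr → Spec_fn arr (fn arr)

-- ===== LEMMAS AND PROOFS =====

-- a i = arr[i] (total form; only used for 0 ≤ i < len arr)
def pvA (arr : List Int) (i : Int) : Int := PySem.List.pyGetD arr i 0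

-- F arr j = sum of arr[i] over i ∈ [0, j] with arr[i]-i = arr[j]-j  (B's inner scan)
def pvF (arr : List Int) (j : Int) : Int :=
  (((PySem.List.pyRange 0 (j + 1) 1).filter
      (fun i => pvA arr i - i = pvA arr j - j)).map (pvA arr)).sum

-- G arr m k = sum of arr[i] over i ∈ [0, m) with arr[i]-i = k  (the dict invariant)
def pvG (arr : List Int) (m k : Int) : Int :=
  (((PySem.List.pyRange 0 m 1).filter
      (fun i => pvA arr i - i = k)).map (pvA arr)).sum

lemma pref_loop (xs : List Int) : ∀ (s : Nat) (pr : List Int), pr.length = s + xs.length →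
    (PySem.List.enumerate xs (s : Int)).foldl
      (fun pr p => PySem.List.pySetD pr p.1 (p.2 - p.1)) pr
    = pr.take s ++ (PySem.List.enumerate xs (s : Int)).map (fun p => p.2 - p.1) := by
  induction xs with
  | nil =>
    intro s pr h
    simp only [List.length_nil] at h
    simp [PySem.List.enumerate_nil]
    omega
  | cons x xs ih =>
    intro s pr h
    simp only [List.length_cons] at h
    rw [PySem.List.enumerate_cons]
    simp only [List.foldl_cons, List.map_cons]
    have hcast : (s : Int) + 1 = ((s + 1 : Nat) : Int) := by push_cast; ring
    have hs : s < pr.length := by omega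
    have hlen : (PySem.List.pySetD pr (s : Int) (x - s)).length = (s + 1) + xs.length := by
      simp only [PySem.List.pySetD_natCast, List.length_set]; omega
    rw [hcast, ih (s + 1) _ hlen]
    simp only [PySem.List.pySetD_natCast]
    rw [List.take_add_one, List.take_set, List.set_eq_of_length_le (by simp)]
    simp [hs, List.append_assoc]

lemma fnA_loop (arr : List Int) : ∀ (c : Nat) (m : Int) (d : PySem.Dict Int Int) (r : Int),
    0 ≤ m → ((arr.length : Int) - m).toNat = c →
    (∀ k, d.getD k 0 = pvG arr m k) →
    ((PySem.List.pyRange m arr.length 1).foldl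
      (fun (st : PySem.Dict Int Int × Int) j =>
        (st.1.insert (pvA arr j - j) (st.1.getD (pvA arr j - j) 0 + pvA arr j),
         max st.2 (st.1.getD (pvA arr j - j) 0 + pvA arr j))) (d, r)).2
    = (PySem.List.pyRange m arr.length 1).foldl (fun r j => max r (pvF arr j)) r := by
  intro c
  induction c with
  | zero =>
    intro m d r hm hc hinv
    rw [PySem.List.pyRange_one_eq_nil (by omega)]
    simp
  | succ c ih =>
    intro m d r hm hc hinv
    have hmn : m < (arr.length : Int) := by omega
    rw [PySem.List.pyRange_one_cons hmn]
    simp only [List.foldl_cons]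
    rw [hinv]
    have hFm : pvG arr m (pvA arr m - m) + pvA arr m = pvF arr m := by
      unfold pvF pvG
      rw [PySem.List.pyRange_one_succ_right hm]
      simp
    rw [hFm]
    apply ih (m + 1) _ _ (by omega) (by omega)
    intro k
    by_cases hk : k = pvA arr m - m
    · subst hk
      rw [PySem.Dict.getD_insert_self]
      unfold pvF pvG
      rw [PySem.List.pyRange_one_succ_right hm]
    · rw [PySem.Dict.getD_insert_of_ne _ _ _ hk, hinv]
      have hk' : ¬ (pvA arr m - m = k) := fun h => hk h.symm
      unfold pvG
      rw [PySem.List.pyRange_one_succ_right hm]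
      simp [List.filter_append, hk']

lemma fnA_eq (arr : List Int) :
    fn arr = (PySem.List.pyRange 0 arr.length 1).foldl (fun r j => max r (pvF arr j)) 0 := by
  simp only [fn]
  have hpref : (PySem.List.enumerate arr).foldl
      (fun pr p => PySem.List.pySetD pr p.1 (p.2 - p.1)) (List.replicate arr.length 0)
      = (PySem.List.pyRange 0 arr.length 1).map (fun j => pvA arr j - j) := by
    have h := pref_loop arr 0 (List.replicate arr.length 0) (by simp)
    simp only [Nat.cast_zero, List.take_zero, List.nil_append] at h
    rw [h, PySem.List.enumerate_eq_map_pyRange arr 0]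
    simp [PySem.List.len_eq, pvA, Function.comp]
  rw [hpref]
  have hlen : PySem.List.len ((PySem.List.pyRange 0 arr.length 1).map (fun j => pvA arr j - j))
      = (arr.length : Int) := by
    simp [PySem.List.len_eq, PySem.List.length_pyRange_one]
  have henum : PySem.List.enumerate
        ((PySem.List.pyRange 0 arr.length 1).map (fun j => pvA arr j - j))
      = (PySem.List.pyRange 0 arr.length 1).map (fun j => (j, pvA arr j - j)) := by
    rw [PySem.List.enumerate_eq_map_pyRange _ 0, hlen]
    refine List.map_congr_left ?_
    intro j hj
    rw [PySem.List.mem_pyRange_one] at hj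
    congr 1
    rw [PySem.List.pyGetD_map_pyRange_of_nonneg _ _ _ _ hj.1 hj.2]
  rw [henum, List.foldl_map]
  have h := fnA_loop arr ((arr.length : Int) - 0).toNat 0 PySem.Dict.empty 0 (by omega) rfl
    (by intro k
        unfold pvG
        rw [PySem.List.pyRange_one_eq_nil (by omega)]
        simp [PySem.Dict.getD, PySem.Dict.get?, PySem.Dict.empty])
  simpa [pvA] using h

lemma fnB_eq (arr : List Int) :
    fn_alt arr = (PySem.List.pyRange 0 arr.length 1).foldl (fun r j => max r (pvF arr j)) 0 := by
  simp only [fn_alt]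
  refine PySem.List.foldl_congr_mem _ _ _ _ ?_
  intro acc j _
  congr 1
  unfold pvF pvA
  rw [PySem.List.foldl_ite_eq_foldl_filter
        (fun i => PySem.List.pyGetD arr i 0 - i = PySem.List.pyGetD arr j 0 - j)
        (fun s i => s + PySem.List.pyGetD arr i 0),
      PySem.List.foldl_add]
  simp

-- ===== VERDICT (by name: the statement is the Claim_ definition above) =====
theorem fn_spec : Claim_equal_fn := by
  intro arr _
  unfold Spec_fn
  rw [fnA_eq, fnB_eq]
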